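-- pv_equiv track=rewrite | github.com/csquires/bmtm-bernoulli | src/tree_structures.py | long_tree_structures
-- ===== SOURCE A (Python) =====
-- def long_tree_structures(max_nodes):
--     if max_nodes == 0:
--         return [[]]
--     if max_nodes == 1:
--         return [[0]]
--     trees = [[0, 0]]
--     for i in range(max_nodes-2):
--         trees.append([0, (i*2)+2] + trees[-1])
--     return trees
-- ===== SOURCE B (Python) =====
-- def long_tree_structures(max_nodes):
--     if max_nodes == 0:
--         return [[]]
--     if max_nodes == 1:
--         return [[0]]
--     # build the single longest caterpillar once, back to front
--     full = [0, 0]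
--     for j in range(1, max_nodes - 1):
--         full = [0, 2 * j] + full
--     # every output tree is a suffix of it
--     return [full[-2 * (k + 1):] for k in range(max_nodes - 1)]
-- ===== Notes on version B (the rewrite author's own statement) =====
-- stated objective: alternative
-- what changed: Instead of A's running accumulator that repeatedly copies the previous tree while appending to the output, B builds the single longest caterpillar once back-to-front and emits every tree as a negative-index suffix slice of it.
-- outside the precondition, e.g. on long_tree_structures(-1): A returns [[0, 0]], B returns []; on long_tree_structures(-2): A returns [[0, 0]], B returns []
import Mathlib
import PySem

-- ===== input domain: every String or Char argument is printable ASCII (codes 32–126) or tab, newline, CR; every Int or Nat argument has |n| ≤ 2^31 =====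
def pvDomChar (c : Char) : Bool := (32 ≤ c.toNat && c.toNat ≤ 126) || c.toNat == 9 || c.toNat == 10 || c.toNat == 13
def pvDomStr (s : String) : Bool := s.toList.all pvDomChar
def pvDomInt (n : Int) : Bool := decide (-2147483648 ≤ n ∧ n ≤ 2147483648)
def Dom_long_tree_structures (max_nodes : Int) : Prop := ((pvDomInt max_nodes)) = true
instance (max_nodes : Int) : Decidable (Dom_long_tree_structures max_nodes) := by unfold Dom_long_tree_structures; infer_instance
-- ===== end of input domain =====

-- B builds the single longest caterpillar once and returns each tree as a suffix slice of it
-- (alternative decomposition, no speed claim).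


-- ===== PORT A =====
def long_tree_structures (max_nodes : Int) : List (List Int) :=
  if max_nodes = 0 then [[]]
  else if max_nodes = 1 then [[0]]
  else
    (PySem.List.pyRange 0 (max_nodes - 2) 1).foldl
      (fun trees i => trees ++ [[0, i * 2 + 2] ++ PySem.List.pyGetD trees (-1) []])
      [[0, 0]]

-- ===== PORT B =====
def long_tree_structures_alt (max_nodes : Int) : List (List Int) :=
  if max_nodes = 0 then [[]]
  else if max_nodes = 1 then [[0]]
  else
    let full :=
      (PySem.List.pyRange 1 (max_nodes - 1) 1).foldl
        (fun full j => [0, 2 * j] ++ full) [0, 0]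
    (PySem.List.pyRange 0 (max_nodes - 1) 1).map
      (fun k => PySem.List.slice full (some (-2 * (k + 1))) none)

-- ===== PRECONDITION & SPEC =====
-- Pre_ restricts to nonnegative node counts, the function's natural domain; a negative count
-- is malformed input outside that domain (A returns [[0, 0]] there, B returns []).
def Pre_long_tree_structures (max_nodes : Int) : Prop := 0 ≤ max_nodes
instance (max_nodes : Int) : Decidable (Pre_long_tree_structures max_nodes) := by unfold Pre_long_tree_structures; infer_instance
def pvWitness_long_tree_structures : Int := (5)

def Spec_long_tree_structures (max_nodes : Int) (out : List (List Int)) : Prop := out = long_tree_structures_alt max_nodes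
instance (max_nodes : Int) (out : List (List Int)) : Decidable (Spec_long_tree_structures max_nodes out) := by unfold Spec_long_tree_structures; infer_instance

-- ===== CLAIM (what is proved, stated in full; the proofs are below) =====
def Claim_equal_long_tree_structures : Prop := ∀ (max_nodes : Int), Dom_long_tree_structures max_nodes → Pre_long_tree_structures max_nodes → Spec_long_tree_structures max_nodes (long_tree_structures max_nodes)

-- ===== LEMMAS AND PROOFS =====

-- the caterpillar with k+1 pairs: [0, 2k, 0, 2(k-1), …, 0, 0]
def pvCat : Nat → List Int
  | 0 => [0, 0]
  | k + 1 => 0 :: (2 * (k + 1) : Int) :: pvCat k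

lemma pvCat_length (n : Nat) : (pvCat n).length = 2 * (n + 1) := by
  induction n with
  | zero => rfl
  | succ k ih => simp [pvCat, ih]; omega

lemma pvCat_drop (n k : Nat) (h : k ≤ n) :
    (pvCat n).drop (2 * (n + 1) - 2 * (k + 1)) = pvCat k := by
  induction n with
  | zero => interval_cases k; simp
  | succ m ih =>
    rcases Nat.eq_or_lt_of_le h with rfl | h'
    · simp
    · have hk : k ≤ m := by omega
      rw [show 2 * (m + 1 + 1) - 2 * (k + 1) = (2 * (m + 1) - 2 * (k + 1)) + 1 + 1 from by omega,
        pvCat, List.drop_succ_cons, List.drop_succ_cons]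
      exact ih hk

-- the list [s, s+1, …, s+t-1] of Ints
def pvInts (s t : Nat) : List Int := (List.range t).map (fun j => ((s + j : Nat) : Int))

lemma pvInts_succ (s t : Nat) : pvInts s (t + 1) = (s : Int) :: pvInts (s + 1) t := by
  unfold pvInts
  rw [List.range_succ_eq_map, List.map_cons, List.map_map]
  refine congrArg₂ _ (by simp) ?_
  exact List.map_congr_left (fun j _ => by simp [Function.comp]; omega)

-- A's loop over [s, s+1, …, s+t-1] starting from [pvCat 0, …, pvCat s]
lemma pvA_fold (t s : Nat) :
    (pvInts s t).foldl
      (fun trees i => trees ++ [[0, i * 2 + 2] ++ PySem.List.pyGetD trees (-1) []])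
      ((List.range (s + 1)).map pvCat)
    = (List.range (s + 1 + t)).map pvCat := by
  induction t generalizing s with
  | zero => simp [pvInts]
  | succ t ih =>
    rw [pvInts_succ, List.foldl_cons]
    have hne : ((List.range (s + 1)).map pvCat) ≠ [] := by simp
    have hlast : PySem.List.pyGetD ((List.range (s + 1)).map pvCat) (-1) ([] : List Int)
        = pvCat s := by
      rw [PySem.List.pyGetD_neg_one _ _ hne, List.getLast_eq_getElem]
      simp
    have hcat : [0, (s : Int) * 2 + 2] ++ pvCat s = pvCat (s + 1) := by
      simp [pvCat]; ring
    have hsucc : (List.range (s + 1 + 1)).map pvCat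
        = (List.range (s + 1)).map pvCat ++ [pvCat (s + 1)] := by
      rw [List.range_succ, List.map_append]; rfl
    rw [hlast, hcat, ← hsucc]
    simpa [Nat.add_assoc, Nat.add_comm, Nat.add_left_comm] using ih (s + 1)

-- B's back-to-front build of the full caterpillar
lemma pvB_fold (t s : Nat) :
    (pvInts (s + 1) t).foldl (fun full j => [0, 2 * j] ++ full) (pvCat s)
    = pvCat (s + t) := by
  induction t generalizing s with
  | zero => simp [pvInts]
  | succ t ih =>
    rw [pvInts_succ, List.foldl_cons]
    have hcat : [0, 2 * ((s + 1 : Nat) : Int)] ++ pvCat s = pvCat (s + 1) := by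
      simp [pvCat]
    rw [hcat]
    simpa [Nat.add_assoc, Nat.add_comm, Nat.add_left_comm] using ih (s + 1)

lemma pvRange_eq_pvInts (s n : Nat) :
    PySem.List.pyRange (s : Int) ((s : Int) + (n : Int)) 1 = pvInts s n := by
  rw [PySem.List.pyRange_one]
  simp [pvInts]

lemma pvSlice_cat (n j : Nat) (h : j ≤ n) :
    PySem.List.slice (pvCat n) (some (-2 * ((j : Int) + 1))) none = pvCat j := by
  have hneg : (-2 * ((j : Int) + 1)) = -(((2 * (j + 1) : Nat) : Int)) := by push_cast; ring
  rw [hneg, PySem.List.slice_from_neg_natCast _ _ (by omega), pvCat_length]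
  exact pvCat_drop n j h

-- ===== VERDICT (by name: the statement is the Claim_ definition above) =====
theorem long_tree_structures_spec : Claim_equal_long_tree_structures := by
  intro m hdom hpre
  unfold Spec_long_tree_structures
  unfold long_tree_structures long_tree_structures_alt
  by_cases h0 : m = 0
  · simp [h0]
  by_cases h1 : m = 1
  · simp [h1]
  rw [if_neg h0, if_neg h1, if_neg h0, if_neg h1]
  have hpre' : (0 : Int) ≤ m := hpre
  have hm2 : 2 ≤ m := by omega
  set n : Nat := (m - 2).toNat with hn
  have hm2' : m - 2 = (n : Int) := by omega
  have hm1' : m - 1 = (n : Int) + 1 := by omega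
  -- A's side
  have hA : PySem.List.pyRange 0 (m - 2) 1 = pvInts 0 n := by
    rw [hm2']
    simpa using pvRange_eq_pvInts 0 n
  have hA2 : ([[0, 0]] : List (List Int)) = (List.range (0 + 1)).map pvCat := by rfl
  rw [hA, hA2, pvA_fold n 0]
  -- B's side
  have hBfull : PySem.List.pyRange 1 (m - 1) 1 = pvInts 1 n := by
    rw [hm1', show (n : Int) + 1 = 1 + (n : Int) from by ring]
    simpa using pvRange_eq_pvInts 1 n
  have hBidx : PySem.List.pyRange 0 (m - 1) 1 = pvInts 0 (n + 1) := by
    rw [hm1']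
    simpa using pvRange_eq_pvInts 0 (n + 1)
  have hB0 : ([0, 0] : List Int) = pvCat 0 := rfl
  rw [hBfull, hBidx, hB0, show pvInts 1 n = pvInts (0 + 1) n from rfl, pvB_fold n 0]
  unfold pvInts
  rw [List.map_map, show 0 + 1 + n = n + 1 from by omega]
  refine List.map_congr_left (fun j hj => ?_)
  rw [List.mem_range] at hj
  have := pvSlice_cat n j (by omega)
  simp only [Function.comp, Nat.zero_add]
  exact this.symm
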